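-- pv_equiv track=rewrite | github.com/Anachronism-N/YanTuYouWo | crawl/src/tutor/faculty_locator.py | _select_best_per_type
-- ===== SOURCE A (Python) =====
-- def _type_priority(source_type: str) -> int:
--     """用于排序，数字越大优先级越高"""
--     return {
--         "advisor_list": 3,
--         "faculty_list": 2,
--         "faculty_by_title": 1,
--     }.get(source_type, 0)
--
-- def _select_best_per_type(validated: list[dict]) -> list[dict]:
--     """
--     从已验证候选中选择最佳信息源：
--       - 博导名录最多 2 个
--       - 师资队伍最多 2 个
--       - 按职称分组最多 1 个
--     """
--     by_type = {"advisor_list": [], "faculty_list": [], "faculty_by_title": []}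
--     for c in validated:
--         t = c.get("type", "faculty_list")
--         if t in by_type:
--             by_type[t].append(c)
--
--     final: list[dict] = []
--     final.extend(by_type["advisor_list"][:2])
--     final.extend(by_type["faculty_list"][:2])
--     final.extend(by_type["faculty_by_title"][:1])
--
--     # 跨 type 去重（同 URL 只保留最高优先级）
--     seen: dict[str, dict] = {}
--     for c in final:
--         if c["url"] not in seen:
--             seen[c["url"]] = c
--         elif _type_priority(c["type"]) > _type_priority(seen[c["url"]]["type"]):
--             seen[c["url"]] = c
--     return list(seen.values())
-- ===== SOURCE B (Python) =====
-- _CAPS = [("advisor_list", 2), ("faculty_list", 2), ("faculty_by_title", 1)]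
--
-- def _select_best_per_type(validated: list[dict]) -> list[dict]:
--     result: list[dict] = []
--     seen: set[str] = set()
--     for t, cap in _CAPS:
--         for c in [d for d in validated if d.get("type", "faculty_list") == t][:cap]:
--             if c["url"] not in seen:
--                 seen.add(c["url"])
--                 result.append(c)
--     return result
-- ===== Notes on version B (the rewrite author's own statement) =====
-- stated objective: simpler
-- what changed: B replaces A's bucket-dict + three extends + priority-replacement dedup dict with a single loop over an ordered (type, cap) table that filters/caps each type in turn and dedups by url with a seen set, dropping the dead priority-replacement branch.
import Mathlib
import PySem

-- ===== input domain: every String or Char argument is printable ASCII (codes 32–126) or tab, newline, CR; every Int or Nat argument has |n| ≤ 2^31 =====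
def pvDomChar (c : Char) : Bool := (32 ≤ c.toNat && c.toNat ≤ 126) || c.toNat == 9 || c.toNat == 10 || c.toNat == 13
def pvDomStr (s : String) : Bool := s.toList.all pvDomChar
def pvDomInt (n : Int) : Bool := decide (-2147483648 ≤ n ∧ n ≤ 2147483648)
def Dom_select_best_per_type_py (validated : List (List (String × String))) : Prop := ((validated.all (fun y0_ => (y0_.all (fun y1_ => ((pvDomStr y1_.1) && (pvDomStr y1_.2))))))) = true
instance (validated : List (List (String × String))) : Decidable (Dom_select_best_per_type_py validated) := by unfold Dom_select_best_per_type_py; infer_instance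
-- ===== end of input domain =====

-- B replaces A's bucket dict + extends + priority-replacement dedup dict with one pass over an
-- ordered (type, cap) table, deduping by url with a seen set (simpler decomposition, same O(n) cost).

-- ===== PORT A =====
-- candidate dicts are association lists; c.get(k, dflt) = first match (shared by both ports)
def cGet? (c : List (String × String)) (k : String) : Option String :=
  (c.find? (fun p => p.1 == k)).map (·.2)

def cGetD (c : List (String × String)) (k dflt : String) : String := (cGet? c k).getD dflt

def typePriority (t : String) : Int :=
  PySem.Dict.getD (PySem.Dict.ofList
    [("advisor_list", (3 : Int)), ("faculty_list", 2), ("faculty_by_title", 1)]) t 0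

def select_best_per_type_py (validated : List (List (String × String))) : List (List (String × String)) :=
  let byType0 : PySem.Dict String (List (List (String × String))) :=
    PySem.Dict.ofList [("advisor_list", []), ("faculty_list", []), ("faculty_by_title", [])]
  let byType := validated.foldl (fun d c =>
      let t := cGetD c "type" "faculty_list"
      if d.contains t then d.modify t [] (· ++ [c]) else d) byType0
  let final := (byType.getD "advisor_list" []).take 2
      ++ (byType.getD "faculty_list" []).take 2
      ++ (byType.getD "faculty_by_title" []).take 1
  -- c["url"] / c["type"] raise KeyError on a missing key (excluded by Pre_); cGetD … "" marks that spot
  let seen : PySem.Dict String (List (String × String)) :=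
    final.foldl (fun seen c =>
      if seen.contains (cGetD c "url" "") = false then seen.insert (cGetD c "url" "") c
      else if typePriority (cGetD c "type" "") >
              typePriority (cGetD (seen.getD (cGetD c "url" "") []) "type" "")
        then seen.insert (cGetD c "url" "") c
        else seen) PySem.Dict.empty
  seen.values

-- ===== PORT B =====
def pvCaps : List (String × Nat) := [("advisor_list", 2), ("faculty_list", 2), ("faculty_by_title", 1)]

def select_best_per_type_py_alt (validated : List (List (String × String))) : List (List (String × String)) :=
  (pvCaps.foldl (fun (acc : List (List (String × String)) × PySem.Set String) tc =>
      ((validated.filter (fun c => cGetD c "type" "faculty_list" == tc.1)).take tc.2).foldl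
        (fun a c =>
          if PySem.Set.contains a.2 (cGetD c "url" "") then a
          else (a.1 ++ [c], PySem.Set.add a.2 (cGetD c "url" ""))) acc)
    ([], PySem.Set.empty)).1

-- ===== PRECONDITION & SPEC =====
-- the candidates A actually selects: first 2 of type advisor_list, first 2 of faculty_list,
-- first 1 of faculty_by_title (missing type defaults to faculty_list), in that order
def pvSel (v : List (List (String × String))) : List (List (String × String)) :=
  (v.filter (fun c => cGetD c "type" "faculty_list" == "advisor_list")).take 2
    ++ (v.filter (fun c => cGetD c "type" "faculty_list" == "faculty_list")).take 2
    ++ (v.filter (fun c => cGetD c "type" "faculty_list" == "faculty_by_title")).take 1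

-- Pre_ excludes exactly the inputs where A raises KeyError: a selected candidate without a
-- "url" key (c["url"]), or a selected candidate sharing its url with another selected one but
-- lacking a "type" key (c["type"] in the dedup comparison).
def Pre_select_best_per_type_py (validated : List (List (String × String))) : Prop :=
  ∀ c ∈ pvSel validated, "url" ∈ c.map Prod.fst ∧
    (2 ≤ (pvSel validated).countP
        (fun c' => cGetD c' "url" "" == cGetD c "url" "") → "type" ∈ c.map Prod.fst)

instance (validated : List (List (String × String))) : Decidable (Pre_select_best_per_type_py validated) := by
  unfold Pre_select_best_per_type_py; infer_instance

def pvWitness_select_best_per_type_py : (List (List (String × String))) :=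
  [[("type", "advisor_list"), ("url", "u")], [("url", "u"), ("type", "faculty_list")]]

def Spec_select_best_per_type_py (validated : List (List (String × String))) (out : List (List (String × String))) : Prop := out = select_best_per_type_py_alt validated
instance (validated : List (List (String × String))) (out : List (List (String × String))) : Decidable (Spec_select_best_per_type_py validated out) := by unfold Spec_select_best_per_type_py; infer_instance

-- ===== CLAIM (what is proved, stated in full; the proofs are below) =====
def Claim_equal_select_best_per_type_py : Prop := ∀ (validated : List (List (String × String))), Dom_select_best_per_type_py validated → Pre_select_best_per_type_py validated → Spec_select_best_per_type_py validated (select_best_per_type_py validated)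

-- ===== LEMMAS AND PROOFS =====

-- proof-side names for the loop bodies of the two ports (definitionally equal to the lambdas)
def pvBucketStep (d : PySem.Dict String (List (List (String × String)))) (c : List (String × String)) :
    PySem.Dict String (List (List (String × String))) :=
  let t := cGetD c "type" "faculty_list"
  if d.contains t then d.modify t [] (· ++ [c]) else d

def pvDedupStep (seen : PySem.Dict String (List (String × String))) (c : List (String × String)) :
    PySem.Dict String (List (String × String)) :=
  if seen.contains (cGetD c "url" "") = false then seen.insert (cGetD c "url" "") c
  else if typePriority (cGetD c "type" "") >
          typePriority (cGetD (seen.getD (cGetD c "url" "") []) "type" "")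
    then seen.insert (cGetD c "url" "") c
    else seen

def pvBStep (a : List (List (String × String)) × PySem.Set String) (c : List (String × String)) :
    List (List (String × String)) × PySem.Set String :=
  if PySem.Set.contains a.2 (cGetD c "url" "") then a
  else (a.1 ++ [c], PySem.Set.add a.2 (cGetD c "url" ""))

def pvBuckets (validated : List (List (String × String))) :
    PySem.Dict String (List (List (String × String))) :=
  validated.foldl pvBucketStep
    (PySem.Dict.ofList [("advisor_list", []), ("faculty_list", []), ("faculty_by_title", [])])

def pvFinal (validated : List (List (String × String))) : List (List (String × String)) :=
  ((pvBuckets validated).getD "advisor_list" []).take 2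
    ++ ((pvBuckets validated).getD "faculty_list" []).take 2
    ++ ((pvBuckets validated).getD "faculty_by_title" []).take 1

lemma portA_eq (v : List (List (String × String))) :
    select_best_per_type_py v = ((pvFinal v).foldl pvDedupStep PySem.Dict.empty).values := rfl

lemma portB_eq (v : List (List (String × String))) :
    select_best_per_type_py_alt v =
      (((v.filter (fun c => cGetD c "type" "faculty_list" == "advisor_list")).take 2
        ++ (v.filter (fun c => cGetD c "type" "faculty_list" == "faculty_list")).take 2
        ++ (v.filter (fun c => cGetD c "type" "faculty_list" == "faculty_by_title")).take 1).foldl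
          pvBStep ([], PySem.Set.empty)).1 := by
  simp only [select_best_per_type_py_alt, pvCaps, List.foldl_cons, List.foldl_nil,
    List.foldl_append]
  rfl

lemma cGet?_isSome_of_mem {c : List (String × String)} {k : String}
    (h : k ∈ c.map Prod.fst) : ∃ x, cGet? c k = some x := by
  obtain ⟨p, hp, hpk⟩ := List.mem_map.mp h
  have : (c.find? (fun p => p.1 == k)).isSome := by
    apply List.find?_isSome.mpr
    exact ⟨p, hp, by simp [hpk]⟩
  obtain ⟨q, hq⟩ := Option.isSome_iff_exists.mp this
  exact ⟨q.2, by simp [cGet?, hq]⟩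

lemma cGetD_indep {c : List (String × String)} {k : String}
    (h : k ∈ c.map Prod.fst) (d1 d2 : String) : cGetD c k d1 = cGetD c k d2 := by
  obtain ⟨x, hx⟩ := cGet?_isSome_of_mem h
  simp [cGetD, hx]

-- the bucket loop of A computes, per type key, the filtered sublist
lemma bucket_getD (l : List (List (String × String)))
    (d : PySem.Dict String (List (List (String × String))))
    (hk : d.keys = ["advisor_list", "faculty_list", "faculty_by_title"])
    (t : String) (ht : t ∈ d.keys) :
    (l.foldl pvBucketStep d).getD t []
      = d.getD t [] ++ l.filter (fun c => cGetD c "type" "faculty_list" == t) := by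
  induction l generalizing d with
  | nil => simp
  | cons c l ih =>
    rw [List.foldl_cons, List.filter_cons]
    by_cases hs : d.contains (cGetD c "type" "faculty_list") = true
    · have hkeq : (d.modify (cGetD c "type" "faculty_list") [] (· ++ [c])).keys = d.keys := by
        rw [PySem.Dict.keys_modify, PySem.Dict.keys_insert_of_contains _ _ hs]
      rw [show pvBucketStep d c = d.modify (cGetD c "type" "faculty_list") [] (· ++ [c]) from
        by simp [pvBucketStep, hs]]
      rw [ih _ (by rw [hkeq, hk]) (by rw [hkeq]; exact ht)]
      rw [PySem.Dict.getD_modify]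
      by_cases hts : t = cGetD c "type" "faculty_list"
      · simp [hts, List.append_assoc]
      · have : (cGetD c "type" "faculty_list" == t) = false := by
          simp [Ne.symm hts]
        simp [hts, this]
    · have hne : (cGetD c "type" "faculty_list" == t) = false := by
        apply beq_eq_false_iff_ne.mpr
        intro he
        exact hs (by rw [he]; exact (PySem.Dict.contains_iff_mem_keys d t).mpr ht)
      rw [show pvBucketStep d c = d from by simp [pvBucketStep, hs]]
      rw [ih d hk ht, hne]
      simp

-- the dedup loop: since priorities are non-increasing along the list, A's replacement branch is
-- dead and the dict loop is B's append-if-url-unseen loop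
lemma dedup_main (F res : List (List (String × String)))
    (d : PySem.Dict String (List (String × String)))
    (hitems : d.items = res.map (fun c => (cGetD c "url" "", c)))
    (hnd : d.keys.Nodup)
    (hpr : ∀ r ∈ res, ∀ c ∈ F, cGetD c "url" "" = cGetD r "url" "" →
      typePriority (cGetD c "type" "") ≤ typePriority (cGetD r "type" ""))
    (hpF : F.Pairwise (fun a b => cGetD b "url" "" = cGetD a "url" "" →
      typePriority (cGetD b "type" "") ≤ typePriority (cGetD a "type" ""))) :
    (F.foldl pvDedupStep d).values = (F.foldl pvBStep (res, d.keys)).1 := by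
  induction F generalizing res d with
  | nil =>
    simp [PySem.Dict.values, hitems, List.map_map, Function.comp_def]
  | cons c F ih =>
    rw [List.foldl_cons, List.foldl_cons]
    have hkeys : d.keys = res.map (fun c => cGetD c "url" "") := by
      simp [PySem.Dict.keys, hitems, List.map_map, Function.comp]
    by_cases hc : d.contains (cGetD c "url" "") = true
    · -- url already present: both loops leave their state unchanged
      obtain ⟨r, hr⟩ : ∃ r, d.get? (cGetD c "url" "") = some r := by
        have := (PySem.Dict.contains_eq_isSome_get? d (cGetD c "url" "")) ▸ hc
        exact Option.isSome_iff_exists.mp this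
      obtain ⟨hrres, hru⟩ : r ∈ res ∧ cGetD r "url" "" = cGetD c "url" "" := by
        have hmem := PySem.Dict.mem_items_of_get?_eq_some d hr
        rw [hitems] at hmem
        obtain ⟨c0, hc0, he⟩ := List.mem_map.mp hmem
        have h2 : c0 = r := congrArg Prod.snd he
        have h1 : cGetD c0 "url" "" = cGetD c "url" "" := congrArg Prod.fst he
        exact ⟨h2 ▸ hc0, h2 ▸ h1⟩
      have hprc : typePriority (cGetD c "type" "") ≤ typePriority (cGetD r "type" "") :=
        hpr r hrres c (List.mem_cons_self ..) hru.symm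
      have hA : pvDedupStep d c = d := by
        rw [pvDedupStep, if_neg (by simp [hc]), PySem.Dict.getD_of_get?_eq_some _ _ hr,
          if_neg (not_lt.mpr hprc)]
      have hB : pvBStep (res, d.keys) c = (res, d.keys) := by
        rw [pvBStep, if_pos]
        have : cGetD c "url" "" ∈ d.keys := (PySem.Dict.contains_iff_mem_keys d _).mp hc
        simpa [PySem.Set.contains] using this
      rw [hA, hB]
      exact ih res d hitems hnd
        (fun r hrm c' hc' hu => hpr r hrm c' (List.mem_cons_of_mem _ hc') hu) hpF.tail
    · -- fresh url: A appends (url, c) to the dict, B appends c to the result and url to seen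
      have hcf : d.contains (cGetD c "url" "") = false := by
        cases h : d.contains (cGetD c "url" "") with
        | false => rfl
        | true => exact absurd h hc
      have hA : pvDedupStep d c = d.insert (cGetD c "url" "") c := by
        rw [pvDedupStep, if_pos (by simp [hcf])]
      have hnotmem : cGetD c "url" "" ∉ d.keys := fun hm =>
        hc ((PySem.Dict.contains_iff_mem_keys d _).mpr hm)
      have hB : pvBStep (res, d.keys) c
          = (res ++ [c], d.keys ++ [cGetD c "url" ""]) := by
        rw [pvBStep, if_neg, PySem.Set.add]
        · rw [if_neg (by simpa [PySem.Set.contains] using hnotmem)]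
        · simpa [PySem.Set.contains] using hnotmem
      rw [hA, hB]
      have hkeys' : (d.insert (cGetD c "url" "") c).keys = d.keys ++ [cGetD c "url" ""] :=
        PySem.Dict.keys_insert_of_not_contains d c hcf
      rw [← hkeys']
      apply ih (res ++ [c])
      · rw [PySem.Dict.items_insert_of_not_contains d c hcf, hitems, List.map_append]
        rfl
      · rw [hkeys']
        rw [List.nodup_append]
        exact ⟨hnd, List.nodup_singleton _, by intro a ha b hb hab; exact hnotmem ((hab.trans (List.mem_singleton.mp hb)) ▸ ha)⟩
      · intro r hrm c' hc' hu
        rcases List.mem_append.mp hrm with h | h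
        · exact hpr r h c' (List.mem_cons_of_mem _ hc') hu
        · rcases List.mem_singleton.mp h with rfl
          exact (List.pairwise_cons.mp hpF).1 c' hc' hu
      · exact hpF.tail

lemma two_le_countP {α : Type} [BEq α] [LawfulBEq α] (l : List α) (p : α → Bool) {a b : α}
    (ha : a ∈ l) (hb : b ∈ l) (hab : a ≠ b) (hpa : p a = true) (hpb : p b = true) :
    2 ≤ l.countP p := by
  have hperm := List.perm_cons_erase ha
  have hb' : b ∈ l.erase a := (List.mem_erase_of_ne (fun h => hab h.symm)).mpr hb
  have h1 : 0 < (l.erase a).countP p := List.countP_pos_iff.mpr ⟨b, hb', hpb⟩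
  rw [hperm.countP_eq, List.countP_cons, hpa]
  simp only [if_pos]
  omega

lemma two_le_countP_parts {α : Type} (X Y : List α) (p : α → Bool) {a b : α}
    (ha : a ∈ X) (hb : b ∈ Y) (hpa : p a = true) (hpb : p b = true) :
    2 ≤ (X ++ Y).countP p := by
  rw [List.countP_append]
  have h1 : 0 < X.countP p := List.countP_pos_iff.mpr ⟨a, ha, hpa⟩
  have h2 : 0 < Y.countP p := List.countP_pos_iff.mpr ⟨b, hb, hpb⟩
  omega

-- ===== VERDICT (by name: the statement is the Claim_ definition above) =====
theorem select_best_per_type_py_spec : Claim_equal_select_best_per_type_py := by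
  intro v _hdom hpre
  unfold Spec_select_best_per_type_py
  rw [portA_eq, portB_eq]
  have h1 : (pvBuckets v).getD "advisor_list" []
      = v.filter (fun c => cGetD c "type" "faculty_list" == "advisor_list") := by
    rw [pvBuckets, bucket_getD _ _ (by decide) _ (by decide)]
    rfl
  have h2 : (pvBuckets v).getD "faculty_list" []
      = v.filter (fun c => cGetD c "type" "faculty_list" == "faculty_list") := by
    rw [pvBuckets, bucket_getD _ _ (by decide) _ (by decide)]
    rfl
  have h3 : (pvBuckets v).getD "faculty_by_title" []
      = v.filter (fun c => cGetD c "type" "faculty_list" == "faculty_by_title") := by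
    rw [pvBuckets, bucket_getD _ _ (by decide) _ (by decide)]
    rfl
  have hFS : pvFinal v = pvSel v := by
    rw [pvFinal, h1, h2, h3, pvSel]
  rw [hFS]
  -- priority of a typed candidate in the segment of type t is typePriority t
  have hprioT : ∀ (t : String) (n : Nat),
      ∀ c ∈ (v.filter (fun c => cGetD c "type" "faculty_list" == t)).take n,
        "type" ∈ c.map Prod.fst → typePriority (cGetD c "type" "") = typePriority t := by
    intro t n c hc hty
    have hm := List.mem_filter.mp (List.take_subset _ _ hc)
    have heq : cGetD c "type" "faculty_list" = t := by simpa using hm.2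
    rw [cGetD_indep hty "" "faculty_list", heq]
  -- Pre_ supplies the "type" key for any selected candidate whose url recurs in the selection
  have hdup : ∀ c ∈ pvSel v,
      2 ≤ (pvSel v).countP (fun c' => cGetD c' "url" "" == cGetD c "url" "") →
        "type" ∈ c.map Prod.fst := fun c hc => (hpre c hc).2
  have hcnt3 : ∀ p, (pvSel v).countP p
      = ((v.filter (fun c => cGetD c "type" "faculty_list" == "advisor_list")).take 2
          ++ (v.filter (fun c => cGetD c "type" "faculty_list" == "faculty_list")).take 2).countP p
        + ((v.filter (fun c => cGetD c "type" "faculty_list" == "faculty_by_title")).take 1).countP p := by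
    intro p
    rw [pvSel, List.countP_append]
  have hpF : (pvSel v).Pairwise (fun a b => cGetD b "url" "" = cGetD a "url" "" →
      typePriority (cGetD b "type" "") ≤ typePriority (cGetD a "type" "")) := by
    rw [pvSel]
    -- within one segment both candidates (if distinct) share a duplicated url, so Pre_ types
    -- them and their priorities are equal; across segments the later priority is smaller
    have within : ∀ (t : String) (n : Nat)
        (hsub : ∀ x ∈ (v.filter (fun c => cGetD c "type" "faculty_list" == t)).take n, x ∈ pvSel v),
        ((v.filter (fun c => cGetD c "type" "faculty_list" == t)).take n).Pairwise
          (fun a b => cGetD b "url" "" = cGetD a "url" "" →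
            typePriority (cGetD b "type" "") ≤ typePriority (cGetD a "type" "")) := by
      intro t n hsub
      apply List.pairwise_of_forall_mem_list
      intro a ha b hb hurl
      by_cases hab : a = b
      · rw [hab]
      · have hc2 : 2 ≤ (pvSel v).countP (fun c' => cGetD c' "url" "" == cGetD a "url" "") :=
          two_le_countP _ _ (hsub a ha) (hsub b hb) hab (by simp) (by simp [hurl])
        have hta := hdup a (hsub a ha) hc2
        have htb := hdup b (hsub b hb) (by rw [← hurl] at hc2; exact hc2)
        rw [hprioT t n a ha hta, hprioT t n b hb htb]
    have cross : ∀ (t1 t2 : String) (n1 n2 : Nat) (a b : List (String × String)),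
        a ∈ (v.filter (fun c => cGetD c "type" "faculty_list" == t1)).take n1 →
        b ∈ (v.filter (fun c => cGetD c "type" "faculty_list" == t2)).take n2 →
        a ∈ pvSel v → b ∈ pvSel v →
        2 ≤ (pvSel v).countP (fun c' => cGetD c' "url" "" == cGetD a "url" "") →
        cGetD b "url" "" = cGetD a "url" "" →
        typePriority t2 ≤ typePriority t1 →
        typePriority (cGetD b "type" "") ≤ typePriority (cGetD a "type" "") := by
      intro t1 t2 n1 n2 a b ha hb hasel hbsel hc2 hurl hle
      have hta := hdup a hasel hc2
      have htb := hdup b hbsel (by rw [← hurl] at hc2; exact hc2)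
      rw [hprioT t1 n1 a ha hta, hprioT t2 n2 b hb htb]
      exact hle
    refine List.pairwise_append.mpr ⟨List.pairwise_append.mpr ⟨?_, ?_, ?_⟩, ?_, ?_⟩
    · exact within "advisor_list" 2
        (fun x hx => by rw [pvSel]; exact List.mem_append_left _ (List.mem_append_left _ hx))
    · exact within "faculty_list" 2
        (fun x hx => by rw [pvSel]; exact List.mem_append_left _ (List.mem_append_right _ hx))
    · intro a ha b hb hurl
      have hasel : a ∈ pvSel v := by
        rw [pvSel]; exact List.mem_append_left _ (List.mem_append_left _ ha)
      have hbsel : b ∈ pvSel v := by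
        rw [pvSel]; exact List.mem_append_left _ (List.mem_append_right _ hb)
      refine cross "advisor_list" "faculty_list" 2 2 a b ha hb hasel hbsel ?_ hurl (by decide)
      rw [hcnt3, List.countP_append]
      have hx : 0 < ((v.filter (fun c => cGetD c "type" "faculty_list" == "advisor_list")).take 2).countP
          (fun c' => cGetD c' "url" "" == cGetD a "url" "") :=
        List.countP_pos_iff.mpr ⟨a, ha, by simp⟩
      have hy : 0 < ((v.filter (fun c => cGetD c "type" "faculty_list" == "faculty_list")).take 2).countP
          (fun c' => cGetD c' "url" "" == cGetD a "url" "") :=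
        List.countP_pos_iff.mpr ⟨b, hb, by simp [hurl]⟩
      omega
    · exact within "faculty_by_title" 1
        (fun x hx => by rw [pvSel]; exact List.mem_append_right _ hx)
    · intro a ha b hb hurl
      have hbsel : b ∈ pvSel v := by rw [pvSel]; exact List.mem_append_right _ hb
      have hasel : a ∈ pvSel v := by rw [pvSel]; exact List.mem_append_left _ ha
      have hc2 : 2 ≤ (pvSel v).countP (fun c' => cGetD c' "url" "" == cGetD a "url" "") := by
        rw [pvSel]
        refine two_le_countP_parts _ _ _ ha hb (beq_self_eq_true _) ?_
        show (cGetD b "url" "" == cGetD a "url" "") = true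
        rw [hurl]
        exact beq_self_eq_true _
      rcases List.mem_append.mp ha with h | h
      · exact cross "advisor_list" "faculty_by_title" 2 1 a b h hb hasel hbsel hc2 hurl (by decide)
      · exact cross "faculty_list" "faculty_by_title" 2 1 a b h hb hasel hbsel hc2 hurl (by decide)
  exact dedup_main (pvSel v) [] PySem.Dict.empty rfl (by decide)
    (by intro r hr; exact absurd hr (List.not_mem_nil)) hpF
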